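-- pv_equiv track=rewrite | github.com/Ciro-Taranto/AoC_2025 | day06/p2.py | solve
-- ===== SOURCE A (Python) =====
-- from functools import reduce
--
-- OPERATORS = {"*": int.__mul__, "+": int.__add__}
--
-- def solve(input_: str) -> list[int]:
--     lines = input_.strip().split("\n")
--     operations = []
--     for i, char in enumerate(lines[-1]):
--         if char in "*+":
--             operations.append((i, char))
--     operations.append((max([len(line) for line in lines]) + 1, None))
--     solutions = []
--     for (start_position, operation), (end_position, _) in zip(
--         operations[:-1], operations[1:]
--     ):
--         values = []
--         for position in range(end_position - 2, start_position - 1, -1):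
--             value = 0
--             for line in lines[:-1]:
--                 if line[position] != " ":
--                     value *= 10
--                     value += int(line[position])
--             values.append(value)
--         solutions.append(
--             reduce(OPERATORS[operation], values, 0 if operation == "+" else 1)
--         )
--     return solutions
-- ===== SOURCE B (Python) =====
-- def solve(input_: str) -> list[int]:
--     lines = input_.strip().split("\n")
--     ops = {i: c for i, c in enumerate(lines[-1]) if c in "*+"}
--     maxlen = max(len(line) for line in lines)
--     if not ops:
--         return []
--     first = next(iter(ops))
--     grid_rev = lines[:-1][::-1]
--
--     def column(p: int) -> int:
--         # bottom-up read with place values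
--         v, pw = 0, 1
--         for line in grid_rev:
--             ch = line[p]
--             if ch != " ":
--                 v += int(ch) * pw
--                 pw *= 10
--         return v
--
--     # single right-to-left sweep with dual accumulators; a column just left
--     # of an operator belongs to no segment and is never read
--     results = []
--     s, pr = 0, 1
--     for p in range(maxlen - 1, first - 1, -1):
--         if p + 1 not in ops:
--             v = column(p)
--             s += v
--             pr *= v
--         if p in ops:
--             results.append(s if ops[p] == "+" else pr)
--             s, pr = 0, 1
--     return results[::-1]
-- ===== Notes on version B (the rewrite author's own statement) =====
-- stated objective: alternative
-- what changed: B drops A's (start,end) segment pairing and per-segment reduce entirely: it makes one right-to-left sweep over the columns keeping a running sum and a running product simultaneously, emitting one of them (and resetting both) whenever it passes an operator position, and it reads each column bottom-up with explicit place values instead of A's top-down Horner accumulation.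
import Mathlib
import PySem

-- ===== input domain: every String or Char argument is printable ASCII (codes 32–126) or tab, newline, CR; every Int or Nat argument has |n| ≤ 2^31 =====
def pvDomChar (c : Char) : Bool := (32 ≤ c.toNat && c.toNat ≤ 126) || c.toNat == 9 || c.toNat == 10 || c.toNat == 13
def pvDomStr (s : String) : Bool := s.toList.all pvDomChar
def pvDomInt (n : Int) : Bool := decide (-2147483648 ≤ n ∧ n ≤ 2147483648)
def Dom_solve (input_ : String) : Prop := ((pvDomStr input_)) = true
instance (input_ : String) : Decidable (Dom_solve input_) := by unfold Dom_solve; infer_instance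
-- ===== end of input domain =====

-- B replaces A's segment pairing (zip of the operator list with its shifted self) and per-segment
-- reduce by a single right-to-left sweep over the columns with dual sum/product accumulators that
-- emits at each operator position, and reads each column bottom-up with place values instead of
-- A's top-down Horner accumulation; same asymptotic cost, no speed claim.

-- int(c) for a one-character string; under Pre_ the character is a digit (Python raises ValueError otherwise)
def pyInt1 (c : Char) : Int := (PySem.Int.ofStr? (String.ofList [c])).getD 0

-- ===== PORT A =====
def solve (input_ : String) : List Int :=
  -- lines = input_.strip().split("\n")   (separator "\n" is nonempty, split? never returns none)
  let lines : List String := (PySem.Str.split? (PySem.Str.strip input_) "\n").getD []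
  -- for i, char in enumerate(lines[-1]): if char in "*+": operations.append((i, char))
  let operations : List (Int × Option Char) :=
    (PySem.List.enumerate (PySem.List.pyGetD lines (-1) "").toList).foldl
      (fun acc ic => if ic.2 == '*' || ic.2 == '+' then acc ++ [(ic.1, some ic.2)] else acc) []
  -- operations.append((max([len(line) for line in lines]) + 1, None))   (lines is nonempty, max never fails)
  let maxlen : Int :=
    (PySem.List.max? (lines.map (fun line => PySem.Str.len line)) (fun x => x)).getD 0
  let operations := operations ++ [(maxlen + 1, (none : Option Char))]
  ((PySem.List.slice operations none (some (-1))).zip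
      (PySem.List.slice operations (some 1) none)).foldl
    (fun solutions pq =>
      let startPosition := pq.1.1
      let operation := pq.1.2
      let endPosition := pq.2.1
      let values : List Int :=
        (PySem.List.pyRange (endPosition - 2) (startPosition - 1) (-1)).foldl
          (fun values position =>
            let value : Int :=
              (PySem.List.slice lines none (some (-1))).foldl
                (fun value line =>
                  -- line[position]: IndexError (excluded by Pre_) is defaulted to ' '
                  let c := PySem.List.pyGetD line.toList position ' '
                  if c ≠ ' ' then value * 10 + pyInt1 c else value) 0
            values ++ [value]) []
      -- reduce(OPERATORS[operation], values, 0 if operation == "+" else 1); operation is '+' or '*' here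
      solutions ++
        [values.foldl (fun a b => if operation == some '+' then a + b else a * b)
          (if operation == some '+' then 0 else 1)]) []

-- ===== PORT B =====
def solve_alt (input_ : String) : List Int :=
  let lines : List String := (PySem.Str.split? (PySem.Str.strip input_) "\n").getD []
  -- ops = {i: c for i, c in enumerate(lines[-1]) if c in "*+"}
  let ops : PySem.Dict Int Char :=
    (PySem.List.enumerate (PySem.List.pyGetD lines (-1) "").toList).foldl
      (fun d ic => if ic.2 == '*' || ic.2 == '+' then d.insert ic.1 ic.2 else d) PySem.Dict.empty
  let maxlen : Int :=
    (PySem.List.max? (lines.map (fun line => PySem.Str.len line)) (fun x => x)).getD 0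
  if ops.items.isEmpty then []
  else
    -- first = next(iter(ops))
    let first : Int := (ops.keys.head?).getD 0
    -- grid_rev = lines[:-1][::-1]
    let gridRev : List String :=
      (PySem.List.slice? (PySem.List.slice lines none (some (-1))) none none (-1)).getD []
    -- column(p): bottom-up read with place values
    let column : Int → Int := fun p =>
      (gridRev.foldl (fun (vp : Int × Int) line =>
          let c := PySem.List.pyGetD line.toList p ' '
          if c ≠ ' ' then (vp.1 + pyInt1 c * vp.2, vp.2 * 10) else vp) ((0 : Int), (1 : Int))).1
    -- single right-to-left sweep with dual accumulators (results, s, pr)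
    let st : List Int × Int × Int :=
      (PySem.List.pyRange (maxlen - 1) (first - 1) (-1)).foldl
        (fun st p =>
          let st1 := if (ops.get? (p + 1)).isNone then
              let v := column p
              (st.1, st.2.1 + v, st.2.2 * v)
            else st
          if (ops.get? p).isSome then
            (st1.1 ++ [if ops.getD p ' ' == '+' then st1.2.1 else st1.2.2], (0 : Int), (1 : Int))
          else st1)
        ([], 0, 1)
    -- return results[::-1]
    (PySem.List.slice? st.1 none none (-1)).getD []

-- ===== PRECONDITION & SPEC =====
-- helpers for Pre_ (input inspection only; shared with no port)
def pvLines (input_ : String) : List String :=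
  (PySem.Str.split? (PySem.Str.strip input_) "\n").getD []

def pvSegs (input_ : String) : List (Int × Int) :=
  let lines := pvLines input_
  let starts : List Int :=
    (((PySem.List.enumerate (PySem.List.pyGetD lines (-1) "").toList).filter
        (fun ic => ic.2 == '*' || ic.2 == '+')).map (fun ic => ic.1))
  let maxlen : Int :=
    (PySem.List.max? (lines.map (fun line => PySem.Str.len line)) (fun x => x)).getD 0
  starts.zip (starts.tail ++ [maxlen + 1])

-- Pre_solve: exactly the inputs on which Python A returns (elsewhere it raises; both ports totalise
-- those raise sites with the same defaults, so the equivalence below happens to hold without Pre_): every column of every operator segment is, in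
-- every grid row, in range (else IndexError) and holds a digit or a space (else ValueError from int()).
def Pre_solve (input_ : String) : Prop :=
  ∀ se ∈ pvSegs input_, ∀ p ∈ PySem.List.pyRange se.1 (se.2 - 1) 1,
    ∀ line ∈ (pvLines input_).dropLast,
      ((PySem.List.pyGet? line.toList p).elim false
        (fun c => c == ' ' || PySem.Chars.isdigit c)) = true

instance (input_ : String) : Decidable (Pre_solve input_) := by unfold Pre_solve; infer_instance

def pvWitness_solve : String := "1 2\n3 4\n+ *"

def Spec_solve (input_ : String) (out : List Int) : Prop := out = solve_alt input_
instance (input_ : String) (out : List Int) : Decidable (Spec_solve input_ out) := by unfold Spec_solve; infer_instance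

-- ===== CLAIM (what is proved, stated in full; the proofs are below) =====
def Claim_equal_solve : Prop := ∀ (input_ : String), Dom_solve input_ → Pre_solve input_ → Spec_solve input_ (solve input_)

-- ===== LEMMAS AND PROOFS =====

-- per-segment value, shared normal form of both sides: fold +/* over the column values of the
-- segment's descending column range
def segval (col : Int → Int) (se : (Int × Char) × Int) : Int :=
  if se.1.2 == '+' then
    ((PySem.List.pyRange (se.2 - 2) (se.1.1 - 1) (-1)).map col).foldl (· + ·) 0
  else
    ((PySem.List.pyRange (se.2 - 2) (se.1.1 - 1) (-1)).map col).foldl (· * ·) 1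

-- A's per-segment computation (values list already rewritten to a map)
def aseg (col : Int → Int) (pq : (Int × Option Char) × (Int × Option Char)) : Int :=
  ((PySem.List.pyRange (pq.2.1 - 2) (pq.1.1 - 1) (-1)).map col).foldl
    (fun a b => if pq.1.2 == some '+' then a + b else a * b)
    (if pq.1.2 == some '+' then (0 : Int) else 1)

-- B's sweep step (proof-side name for the loop body of solve_alt)
def sstep (d : PySem.Dict Int Char) (col : Int → Int)
    (st : List Int × Int × Int) (p : Int) : List Int × Int × Int :=
  let st1 := if (d.get? (p + 1)).isNone then
      let v := col p
      (st.1, st.2.1 + v, st.2.2 * v)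
    else st
  if (d.get? p).isSome then
    (st1.1 ++ [if d.getD p ' ' == '+' then st1.2.1 else st1.2.2], (0 : Int), (1 : Int))
  else st1

-- Horner fold with a nonzero seed: the seed shifts by one decimal place per accepted element
theorem horner_shift {α : Type} (t : α → Prop) [DecidablePred t] (d : α → Int) :
    ∀ (l : List α) (v : Int),
    l.foldl (fun v a => if t a then v * 10 + d a else v) v
      = v * 10 ^ (l.countP (fun a => decide (t a)))
        + l.foldl (fun v a => if t a then v * 10 + d a else v) 0
  | [], v => by simp
  | a :: l, v => by
    by_cases h : t a
    · simp only [List.foldl_cons, if_pos h, List.countP_cons_of_pos (p := fun a => decide (t a)) (l := l) (by simpa using h),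
        zero_mul, zero_add]
      rw [horner_shift t d l (v * 10 + d a), horner_shift t d l (d a)]
      ring
    · simp only [List.foldl_cons, if_neg h,
        List.countP_cons_of_neg (p := fun a => decide (t a)) (l := l) (by simpa using h)]
      exact horner_shift t d l v

-- bottom-up place-value accumulation over the reversed list = top-down Horner accumulation
theorem col_rev {α : Type} (t : α → Prop) [DecidablePred t] (d : α → Int) :
    ∀ (l : List α),
    l.reverse.foldl (fun vp a => if t a then (vp.1 + d a * vp.2, vp.2 * 10) else vp)
        ((0 : Int), (1 : Int))
      = (l.foldl (fun v a => if t a then v * 10 + d a else v) 0,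
         10 ^ (l.countP (fun a => decide (t a))))
  | [] => by simp
  | a :: l => by
    rw [List.reverse_cons, List.foldl_append, col_rev t d l]
    by_cases h : t a
    · simp only [List.foldl_cons, List.foldl_nil, if_pos h,
        List.countP_cons_of_pos (p := fun a => decide (t a)) (l := l) (by simpa using h), zero_mul, zero_add]
      refine Prod.ext ?_ ?_
      · show _ + _ = _
        rw [horner_shift t d l (d a)]
        ring
      · show _ * _ = _
        rw [pow_succ]
    · simp only [List.foldl_cons, List.foldl_nil, if_neg h,
        List.countP_cons_of_neg (p := fun a => decide (t a)) (l := l) (by simpa using h)]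

-- a descending range splits at any intermediate point
theorem pyRange_desc_split (a b c : Int) (h1 : c ≤ b) (h2 : b ≤ a) :
    PySem.List.pyRange a c (-1)
      = PySem.List.pyRange a b (-1) ++ PySem.List.pyRange b c (-1) := by
  rw [PySem.List.pyRange_neg_one_eq_reverse, PySem.List.pyRange_neg_one_eq_reverse,
    PySem.List.pyRange_neg_one_eq_reverse,
    PySem.List.pyRange_one_append (c + 1) (b + 1) (a + 1) (by omega) (by omega),
    List.reverse_append]

-- a maximal run of read columns ending at the emitting operator position s:
-- the sweep accumulates every column into both accumulators and emits at s
theorem sweep_run (d : PySem.Dict Int Char) (col : Int → Int) :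
    ∀ (n : Nat) (t s : Int) (c : Char) (res : List Int) (sm pr : Int),
    (t - s).toNat = n → s ≤ t →
    (∀ p, s < p → p ≤ t + 1 → d.get? p = none) →
    d.get? s = some c →
    (PySem.List.pyRange t (s - 1) (-1)).foldl (sstep d col) (res, sm, pr)
      = (res ++ [if c == '+' then
            ((PySem.List.pyRange t (s - 1) (-1)).map col).foldl (· + ·) sm
          else ((PySem.List.pyRange t (s - 1) (-1)).map col).foldl (· * ·) pr], 0, 1) := by
  intro n
  induction n with
  | zero =>
    intro t s c res sm pr h0 hst hnone hs
    have ht : t = s := by omega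
    subst ht
    rw [PySem.List.pyRange_neg_one_cons (by omega), PySem.List.pyRange_neg_one_eq_nil (le_refl _)]
    have h1 : d.get? (t + 1) = none := hnone _ (by omega) (by omega)
    have hgetD : d.getD t ' ' = c := by
      rw [PySem.Dict.getD_eq_get?_getD, hs]; rfl
    by_cases hc : (c == '+') = true <;>
      simp [sstep, h1, hs, hgetD, hc]
  | succ n ih =>
    intro t s c res sm pr h0 hst hnone hs
    have hts : s < t := by omega
    rw [PySem.List.pyRange_neg_one_cons (by omega)]
    have h1 : d.get? (t + 1) = none := hnone _ (by omega) (by omega)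
    have h2 : d.get? t = none := hnone _ (by omega) (by omega)
    have hstep : sstep d col (res, sm, pr) t = (res, sm + col t, pr * col t) := by
      simp [sstep, h1, h2]
    rw [List.foldl_cons, hstep,
      ih (t - 1) s c res (sm + col t) (pr * col t) (by omega) (by omega)
        (fun p hp1 hp2 => hnone p hp1 (by omega)) hs]
    by_cases hc : (c == '+') = true <;> simp [hc, List.foldl_cons]

-- one whole segment block [s, e-1] of the sweep (e the next operator): the column e-1 is
-- skipped, the columns e-2 … s are read, and the value for the operator at s is emitted
theorem sweep_block (d : PySem.Dict Int Char) (col : Int → Int) (s e : Int) (c ce : Char)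
    (res : List Int) (hse : s < e) (hs : d.get? s = some c) (he : d.get? e = some ce)
    (hnone : ∀ p, s < p → p < e → d.get? p = none) :
    (PySem.List.pyRange (e - 1) (s - 1) (-1)).foldl (sstep d col) (res, 0, 1)
      = (res ++ [segval col ((s, c), e)], 0, 1) := by
  rw [PySem.List.pyRange_neg_one_cons (by omega : s - 1 < e - 1),
    show e - 1 - 1 = e - 2 from by ring]
  by_cases hb : s = e - 1
  · have hsg : d.get? (e - 1) = some c := by rw [← hb]; exact hs
    have hgetD : d.getD (e - 1) ' ' = c := by
      rw [PySem.Dict.getD_eq_get?_getD, hsg]; rfl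
    have hrange : PySem.List.pyRange (e - 2) (s - 1) (-1) = [] :=
      PySem.List.pyRange_neg_one_eq_nil (by omega)
    by_cases hc : (c == '+') = true <;>
      simp [sstep, he, hsg, hgetD, segval, hrange, hc]
  · have h2 : d.get? (e - 1) = none := hnone _ (by omega) (by omega)
    have hstep : sstep d col (res, 0, 1) (e - 1) = (res, 0, 1) := by
      simp [sstep, he, h2]
    rw [List.foldl_cons, hstep,
      sweep_run d col ((e - 2 - s).toNat) (e - 2) s c res 0 1 rfl (by omega)
        (fun p hp1 hp2 => hnone p hp1 (by omega)) hs]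
    by_cases hc : (c == '+') = true <;> simp [segval, hc]

-- the whole sweep over the columns T … s (s the first operator position) produces, in reverse,
-- one value per operator segment
theorem sweep_segs (d : PySem.Dict Int Char) (col : Int → Int) (T : Int) :
    ∀ (X : List (Int × Char)) (s : Int) (c : Char) (res : List Int),
    (∀ pc ∈ (s, c) :: X, d.get? pc.1 = some pc.2) →
    (∀ q ∈ ((s, c) :: X).map (fun pc => pc.1), q ≤ T) →
    ((((s, c) :: X).map (fun pc => pc.1)).Pairwise (· < ·)) →
    (∀ p, s ≤ p → p ≤ T + 1 → p ∉ ((s, c) :: X).map (fun pc => pc.1) → d.get? p = none) →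
    (PySem.List.pyRange T (s - 1) (-1)).foldl (sstep d col) (res, 0, 1)
      = (res ++ ((((s, c) :: X).zip (X.map (fun pc => pc.1) ++ [T + 2])).map (segval col)).reverse,
         0, 1)
  | [], s, c, res, hsome, hle, hsort, hnone => by
    have hs : d.get? s = some c := hsome (s, c) (by simp)
    have hsT : s ≤ T := hle s (by simp)
    rw [sweep_run d col ((T - s).toNat) T s c res 0 1 rfl hsT
      (fun p hp1 hp2 => hnone p (by omega) hp2 (by simp; omega)) hs]
    have h2 : T + 2 - 2 = T := by ring
    by_cases hc : (c == '+') = true <;> simp [segval, h2, hc]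
  | (s', c') :: X, s, c, res, hsome, hle, hsort, hnone => by
    have hss' : s < s' := by
      have := (List.pairwise_cons.mp hsort).1
      exact this s' (by simp)
    have hs'T : s' ≤ T := hle s' (by simp)
    have htail : ∀ q ∈ ((s', c') :: X).map (fun pc => pc.1), s' ≤ q := by
      intro q hq
      rcases (by simpa using hq : q = s' ∨ q ∈ X.map (fun pc => pc.1)) with rfl | hq'
      · omega
      · have := (List.pairwise_cons.mp ((List.pairwise_cons.mp hsort).2)).1
        exact le_of_lt (this q hq')
    rw [pyRange_desc_split T (s' - 1) (s - 1) (by omega) (by omega), List.foldl_append,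
      sweep_segs d col T X s' c' res
        (fun pc hpc => hsome pc (by simp at hpc ⊢; tauto))
        (fun q hq => hle q (by simp at hq ⊢; tauto))
        ((List.pairwise_cons.mp hsort).2)
        (fun p hp1 hp2 hp3 => hnone p (by omega) hp2 (by
          simp at hp3 ⊢
          exact ⟨by omega, hp3⟩)),
      sweep_block d col s s' c c'
        (res ++ ((((s', c') :: X).zip (X.map (fun pc => pc.1) ++ [T + 2])).map
          (segval col)).reverse)
        hss' (hsome (s, c) (by simp)) (hsome (s', c') (by simp))
        (fun p hp1 hp2 => hnone p (by omega) (by omega) (by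
          intro hmem
          rcases (by simpa using hmem : p = s ∨ p = s' ∨ ∃ x, (p, x) ∈ X) with rfl | rfl | ⟨x, hx⟩
          · omega
          · omega
          · have := htail p (by simp; exact Or.inr ⟨x, hx⟩)
            omega))]
    simp [List.append_assoc]

-- A's per-pair value is the shared per-segment normal form
theorem aseg_eq_segval (col : Int → Int) (s e : Int) (c : Char) (o : Option Char) :
    aseg col ((s, some c), (e, o)) = segval col ((s, c), e) := by
  have hbeq : ((some c == some '+')) = (c == '+') := rfl
  by_cases hc : (c == '+') = true <;> simp [aseg, segval, hbeq, hc]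

-- A's zip of the operator list with its shifted self, mapped through aseg, is the
-- per-segment map over (operator, next-start) pairs
theorem a_norm (col : Int → Int) (z : Int) :
    ∀ (X : List (Int × Char)),
    ((X.map (fun ic => (ic.1, some ic.2))).zip
        ((X.map (fun ic => (ic.1, some ic.2)) ++ [(z, (none : Option Char))]).tail)).map (aseg col)
      = (X.zip (X.tail.map (fun pc => pc.1) ++ [z])).map (segval col)
  | [] => by simp
  | [x] => by
    simp only [List.map_cons, List.map_nil, List.cons_append, List.nil_append, List.tail_cons,
      List.zip_cons_cons, List.zip_nil_right, List.map_nil]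
    simp [aseg_eq_segval col x.1 z x.2 none]
  | x :: x' :: X => by
    have ih := a_norm col z (x' :: X)
    simp only [List.map_cons, List.cons_append, List.tail_cons, List.zip_cons_cons,
      List.map_cons] at ih ⊢
    exact congrArg₂ List.cons (aseg_eq_segval col x.1 x'.1 x.2 (some x'.2)) ih

-- a conditional-insert loop is the insert loop over the filtered list
theorem foldl_if_insert {α : Type} (p : α → Bool)
    (f : PySem.Dict Int Char → α → PySem.Dict Int Char) :
    ∀ (l : List α) (d : PySem.Dict Int Char),
    l.foldl (fun d a => if p a then f d a else d) d = (l.filter p).foldl f d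
  | [], d => rfl
  | a :: l, d => by
    by_cases h : p a <;> simp [h, foldl_if_insert p f l]

set_option maxHeartbeats 2000000 in
theorem solve_eq (input_ : String) : solve input_ = solve_alt input_ := by
  simp only [solve, solve_alt]
  rw [PySem.List.foldl_append_if (fun (ic : Int × Char) => ic.2 == '*' || ic.2 == '+')
      (fun (ic : Int × Char) => ((ic.1 : Int), some ic.2)), List.nil_append]
  rw [foldl_if_insert (fun (ic : Int × Char) => ic.2 == '*' || ic.2 == '+')
      (fun d ic => d.insert ic.1 ic.2)]
  simp only [PySem.List.slice_to_neg_one, PySem.List.slice_from_one, List.dropLast_concat]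
  rw [PySem.List.foldl_append_singleton_eq_map, List.nil_append]
  simp only [PySem.List.foldl_append_singleton_eq_map, List.nil_append]
  generalize (PySem.Str.split? (PySem.Str.strip input_) "\n").getD [] = L
  generalize hX : List.filter (fun ic => ic.2 == '*' || ic.2 == '+')
      (PySem.List.enumerate (PySem.List.pyGetD L (-1) "").toList) = X
  set M : Int := (PySem.List.max? (List.map (fun line => PySem.Str.len line) L) fun x => x).getD 0
    with hM
  set D : PySem.Dict Int Char :=
      List.foldl (fun d ic => d.insert ic.1 ic.2) PySem.Dict.empty X with hD
  set acol : Int → Int := fun x =>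
      List.foldl
        (fun value line =>
          if PySem.List.pyGetD line.toList x ' ' ≠ ' ' then
            value * 10 + pyInt1 (PySem.List.pyGetD line.toList x ' ')
          else value)
        0 L.dropLast with hacol
  set bcol : Int → Int := fun p =>
      (List.foldl
          (fun vp line =>
            if PySem.List.pyGetD line.toList p ' ' ≠ ' ' then
              (vp.1 + pyInt1 (PySem.List.pyGetD line.toList p ' ') * vp.2, vp.2 * 10)
            else vp)
          ((0 : Int), (1 : Int)) ((PySem.List.slice? L.dropLast none none (-1)).getD [])).1
    with hbcol
  show List.map (aseg acol)
      ((List.map (fun ic => (ic.1, some ic.2)) X).zip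
        (List.map (fun ic => (ic.1, some ic.2)) X ++ [(M + 1, (none : Option Char))]).tail)
    = if D.items.isEmpty = true then []
      else (PySem.List.slice?
          (List.foldl (sstep D bcol) ([], 0, 1)
            (PySem.List.pyRange (M - 1) ((D.keys.head?).getD 0 - 1) (-1))).1
          none none (-1)).getD []
  have hsub : X.Sublist (PySem.List.enumerate
      (PySem.List.pyGetD L (-1) "").toList) := by
    rw [← hX]; exact List.filter_sublist
  have hpwX : X.Pairwise (fun p q => p.1 < q.1) :=
    List.Pairwise.sublist hsub (PySem.List.pairwise_lt_enumerate _ _)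
  have hpw : (X.map (fun pc => pc.1)).Pairwise (· < ·) := List.pairwise_map.mpr hpwX
  have hbound : ∀ q ∈ X.map (fun pc => pc.1), q ≤ M - 1 := by
    intro q hq
    obtain ⟨pc, hpc, rfl⟩ := List.mem_map.mp hq
    have hmem := hsub.subset hpc
    rw [PySem.List.mem_enumerate_iff] at hmem
    obtain ⟨k, hk, hpc2⟩ := hmem
    by_cases hL0 : L = []
    · subst hL0
      simp [PySem.List.pyGetD, PySem.List.pyGet?] at hk
    · obtain ⟨m, hm⟩ : ∃ m, PySem.List.max?
          (List.map (fun line => PySem.Str.len line) L) (fun x => x) = some m := by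
        cases h : PySem.List.max? (List.map (fun line => PySem.Str.len line) L) (fun x => x) with
        | none =>
          rw [PySem.List.max?_eq_none_iff] at h
          exact absurd (List.map_eq_nil_iff.mp h) hL0
        | some m => exact ⟨m, rfl⟩
      have hlast : PySem.List.pyGetD L (-1) "" = L.getLast hL0 :=
        PySem.List.pyGetD_neg_one L "" hL0
      have hmax := PySem.List.max?_isMax hm (PySem.Str.len (L.getLast hL0))
        (List.mem_map_of_mem (List.getLast_mem hL0))
      rw [hM, hm]
      simp only [Option.getD_some]
      rw [hpc2]
      simp only [PySem.Str.len_eq] at hmax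
      rw [hlast] at hk
      omega
  rcases X with _ | ⟨⟨s1, c1⟩, X'⟩
  · rw [hD]
    simp [show (PySem.Dict.empty : PySem.Dict Int Char).items = [] from rfl]
  · have hnodup : (((s1, c1) :: X').map (fun pc => pc.1)).Nodup :=
      hpw.imp (fun h => ne_of_lt h)
    have hitems : D.items = (s1, c1) :: X' := by
      rw [hD, PySem.Dict.items_foldl_insert_fresh ((s1, c1) :: X')
        (fun pc => pc.1) (fun pc => pc.2) PySem.Dict.empty
        (fun a _ => PySem.Dict.contains_empty _) hnodup]
      simp [show (PySem.Dict.empty : PySem.Dict Int Char).items = [] from rfl]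
    have hDmk : D = PySem.Dict.mk ((s1, c1) :: X') := PySem.Dict.ext hitems
    have hkeys : D.keys = ((s1, c1) :: X').map (fun pc => pc.1) := by
      rw [hDmk]; simp [PySem.Dict.keys]
    rw [if_neg (by simp [hitems])]
    have hfirst : D.keys.head?.getD 0 = s1 := by rw [hkeys]; rfl
    rw [hfirst]
    have hsome : ∀ pc ∈ (s1, c1) :: X', D.get? pc.1 = some pc.2 := by
      intro pc hpc
      exact PySem.Dict.get?_of_mem_items D (by rw [hitems]; exact hpc)
        (by rw [hkeys]; exact hnodup)
    have hnone : ∀ p, p ∉ ((s1, c1) :: X').map (fun pc => pc.1) → D.get? p = none := by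
      intro p hp
      rw [PySem.Dict.get?_eq_none_iff_not_mem_keys D p, hkeys]
      exact hp
    rw [sweep_segs D bcol (M - 1) X' s1 c1 [] hsome hbound hpw
      (fun p _ _ hp => hnone p hp)]
    rw [PySem.List.slice?_none_none_neg_one, Option.getD_some, List.nil_append,
      List.reverse_reverse]
    rw [a_norm acol (M + 1) ((s1, c1) :: X')]
    rw [show M - 1 + 2 = M + 1 from by ring]
    have hcol : acol = bcol := by
      funext p
      rw [hacol, hbcol]
      simp only [PySem.List.slice?_none_none_neg_one, Option.getD_some]
      exact (congrArg Prod.fst (col_rev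
        (fun line => PySem.List.pyGetD line.toList p ' ' ≠ ' ')
        (fun line => pyInt1 (PySem.List.pyGetD line.toList p ' ')) L.dropLast)).symm
    rw [hcol]
    rfl

-- ===== VERDICT (by name: the statement is the Claim_ definition above) =====
theorem solve_spec : Claim_equal_solve := by
  intro input_ _ _
  unfold Spec_solve
  exact solve_eq input_
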